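-- pv_equiv track=rewrite | github.com/Gayeon6423/Improvement-of-the-Coreference-Resolution-model | pre_process.py | calculate_new_offsets
-- ===== SOURCE A (Python) =====
-- def calculate_new_offsets(ontonotes_sentence, coreference_offsets):
--     """
--     Extracts sentences containing the words at specified coreference offsets,
--     while preserving the order of occurrence, and adjusts offsets based on the new subset of sentences.
--
--     Args:
--     ontonotes_sentence (list of lists): The sentence in OntoNotes format.
--     coreference_offsets (list of lists): Coreference offsets indicating word positions.
--
--     Returns:
--     tuple: Ordered sentences containing the coreference words and adjusted offsets.
--     """
--     unique_sentences = []
--     adjusted_offsets = []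
--
--     # Track cumulative sentence length as we build the subset of sentences
--     cumulative_length = 0
--     previous_length = 0
--     for offset in coreference_offsets:
--         for sentence_idx, sentence in enumerate(ontonotes_sentence):
--             # Calculate start and end indices for the sentence
--             sentence_start = sum(len(s) for s in ontonotes_sentence[:sentence_idx])
--             sentence_end = sentence_start + len(sentence) - 1
--
--             # Check if the offset is within the sentence's range
--             if sentence_start <= offset[0] <= sentence_end:
--                 if sentence not in unique_sentences:
--                     unique_sentences.append(sentence)
--                     cumulative_length += previous_length
--
--                 # Adjust offset relative to the current sentence in the subset
--                 new_offset_start = offset[0] - sentence_start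
--                 new_offset_end = new_offset_start + (offset[1] - offset[0])
--
--                 # Add cumulative length of previous sentences (if any)
--                 adjusted_offset = [
--                     new_offset_start + cumulative_length,
--                     new_offset_end + cumulative_length
--                 ]
--                 adjusted_offsets.append(adjusted_offset)
--                 previous_length = len(unique_sentences[-1])
--                 break
--
--     return unique_sentences, adjusted_offsets
-- ===== SOURCE B (Python) =====
-- def calculate_new_offsets(ontonotes_sentence, coreference_offsets):
--     """Same result as A in three stages: (1) build, once, a hash index from
--     global word position to (containing sentence, its start); (2) resolve every
--     offset to its hit by one lookup; (3) one fold over the hits keeping only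
--     (unique sentences, seen-set, running total length, output) -- the adjusted
--     base is recovered as total - len(last unique sentence), so A's
--     cumulative/previous pair and its per-offset rescan disappear (at the cost
--     of the index's memory)."""
--     # stage 1: position index
--     index = {}
--     start = 0
--     for sentence in ontonotes_sentence:
--         for k in range(len(sentence)):
--             index[start + k] = (sentence, start)
--         start += len(sentence)
--
--     # stage 2: resolve offsets (out-of-range offsets contribute nothing)
--     hits = [(index[o[0]], o[0], o[1]) for o in coreference_offsets if o[0] in index]
--
--     # stage 3: fold over the hits
--     unique, seen, total, out = [], set(), 0, []
--     for (sentence, s_start), p, q in hits: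
--         key = tuple(sentence)
--         if key not in seen:
--             seen.add(key)
--             unique.append(sentence)
--             total += len(sentence)
--         base = total - len(unique[-1])
--         out.append([p - s_start + base, q - s_start + base])
--     return unique, out
-- ===== Notes on version B (the rewrite author's own statement) =====
-- stated objective: alternative
-- what changed: B works in three stages instead of A's single nested loop: it builds a position->(sentence,start) hash index once, resolves every offset by one lookup into a hit list, then folds over the hits with reduced state (unique list, seen-set, running total), recovering the adjustment base as total minus the last unique sentence's length instead of A's cumulative/previous pair inside a per-offset rescan with recomputed prefix sums; it trades memory for the index.
-- outside the precondition, e.g. on calculate_new_offsets([], [[]]): A returns ([], []), B raises IndexError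
import Mathlib
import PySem

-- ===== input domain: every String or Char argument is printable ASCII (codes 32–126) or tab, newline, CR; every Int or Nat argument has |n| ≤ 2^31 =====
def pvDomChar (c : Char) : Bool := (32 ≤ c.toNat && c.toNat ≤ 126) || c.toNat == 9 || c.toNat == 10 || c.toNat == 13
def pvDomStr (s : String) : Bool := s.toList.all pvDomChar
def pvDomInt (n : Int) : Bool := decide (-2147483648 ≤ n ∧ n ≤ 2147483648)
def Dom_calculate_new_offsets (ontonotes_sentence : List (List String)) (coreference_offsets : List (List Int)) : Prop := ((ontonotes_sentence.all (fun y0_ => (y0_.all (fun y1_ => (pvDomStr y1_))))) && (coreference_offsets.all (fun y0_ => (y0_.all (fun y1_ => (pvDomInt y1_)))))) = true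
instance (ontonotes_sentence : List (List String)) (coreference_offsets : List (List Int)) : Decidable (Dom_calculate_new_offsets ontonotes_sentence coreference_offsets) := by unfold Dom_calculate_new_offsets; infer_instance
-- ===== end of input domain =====

-- B replaces A's single loop (per-offset rescan of all sentences with recomputed prefix
-- sums and a cumulative/previous state pair) by three stages: a position->sentence hash
-- index built once, a lookup pass resolving every offset to a hit, and a fold over the
-- hits whose adjustment base is recovered from the running total length (an alternative
-- decomposition, trading memory for the index); same return value on every input
-- admitted by Pre_.

-- ===== PORT A =====

-- sum(len(s) for s in l)
def pvSumLen (l : List (List String)) : Nat := (l.map List.length).sum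

-- A's inner 'for sentence_idx, sentence in enumerate(ontonotes_sentence)' loop with
-- its break: returns the matched (sentence, sentence_start), none if no break fires.
def pvScanA (full : List (List String)) (rest : List (List String)) (idx : Nat) (o0 : Int) :
    Option (List String × Int) :=
  match rest with
  | [] => none
  | s :: rest' =>
    let start : Int := (pvSumLen (full.take idx) : Int)
    if start ≤ o0 ∧ o0 ≤ start + (s.length : Int) - 1 then some (s, start)
    else pvScanA full rest' (idx + 1) o0

-- body of A's outer 'for offset in coreference_offsets' loop; state =
-- (unique_sentences, adjusted_offsets, cumulative_length, previous_length)
def pvStepA (ont : List (List String))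
    (st : List (List String) × List (List Int) × Int × Int) (o : List Int) :
    List (List String) × List (List Int) × Int × Int :=
  match pvScanA ont ont 0 (o.getD 0 0) with
  | none => st
  | some (s, start) =>
    let o0 := o.getD 0 0
    let o1 := o.getD 1 0
    let us := if s ∈ st.1 then st.1 else st.1 ++ [s]
    let cum := if s ∈ st.1 then st.2.2.1 else st.2.2.1 + st.2.2.2
    let ns := o0 - start + cum
    (us, st.2.1 ++ [[ns, ns + (o1 - o0)]], cum, (((us.getLast?).getD []).length : Int))

def calculate_new_offsets (ontonotes_sentence : List (List String)) (coreference_offsets : List (List Int)) : List (List String) × List (List Int) :=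
  let st := coreference_offsets.foldl (pvStepA ontonotes_sentence) ([], [], 0, 0)
  (st.1, st.2.1)

-- ===== PORT B =====

-- stage 1: index[start + k] = (sentence, start) for every global word position
def pvBuildIdx (l : List (List String)) (start : Int) (d : PySem.Dict Int (List String × Int)) :
    PySem.Dict Int (List String × Int) :=
  match l with
  | [] => d
  | s :: rest =>
    pvBuildIdx rest (start + (s.length : Int))
      ((List.range s.length).foldl (fun d (k : Nat) => d.insert (start + (k : Int)) (s, start)) d)

-- stage 2: the hit list [(index[o[0]], o[0], o[1]) for o in offsets if o[0] in index]
def pvHits (d : PySem.Dict Int (List String × Int)) (offs : List (List Int)) :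
    List ((List String × Int) × Int × Int) :=
  offs.filterMap (fun o => (d.get? (o.getD 0 0)).map (fun h => (h, o.getD 0 0, o.getD 1 0)))

-- stage 3 body; state = (unique, seen, total, out)
def pvStepB
    (st : List (List String) × PySem.Set (List String) × Int × List (List Int))
    (h : (List String × Int) × Int × Int) :
    List (List String) × PySem.Set (List String) × Int × List (List Int) :=
  let fresh : Bool := ! st.2.1.contains h.1.1
  let unique := if fresh then st.1 ++ [h.1.1] else st.1
  let seen := if fresh then st.2.1.add h.1.1 else st.2.1
  let total := if fresh then st.2.2.1 + (h.1.1.length : Int) else st.2.2.1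
  let base := total - (((unique.getLast?).getD []).length : Int)
  (unique, seen, total, st.2.2.2 ++ [[h.2.1 - h.1.2 + base, h.2.2 - h.1.2 + base]])

def calculate_new_offsets_alt (ontonotes_sentence : List (List String)) (coreference_offsets : List (List Int)) : List (List String) × List (List Int) :=
  let d := pvBuildIdx ontonotes_sentence 0 PySem.Dict.empty
  let st := (pvHits d coreference_offsets).foldl pvStepB ([], PySem.Set.empty, 0, [])
  (st.1, st.2.2.2)

-- ===== PRECONDITION & SPEC =====
-- Pre_ excludes offsets with fewer than two elements whose first element (if any) lies
-- inside the corpus range [0, total words) — there Python A raises IndexError at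
-- offset[0]/offset[1], as does B — and empty offset lists, on which A raises IndexError
-- whenever ontonotes_sentence is nonempty (but returns when it is empty) while B raises always.
def Pre_calculate_new_offsets (ontonotes_sentence : List (List String)) (coreference_offsets : List (List Int)) : Prop :=
  ∀ o ∈ coreference_offsets,
    2 ≤ o.length ∨
      (o.length = 1 ∧ (o.getD 0 0 < 0 ∨ ((pvSumLen ontonotes_sentence : Nat) : Int) ≤ o.getD 0 0))
instance (ontonotes_sentence : List (List String)) (coreference_offsets : List (List Int)) : Decidable (Pre_calculate_new_offsets ontonotes_sentence coreference_offsets) := by unfold Pre_calculate_new_offsets; infer_instance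

def pvWitness_calculate_new_offsets : List (List String) × List (List Int) :=
  ([["a", "b"], ["c"]], [[2, 2], [0, 1]])

def Spec_calculate_new_offsets (ontonotes_sentence : List (List String)) (coreference_offsets : List (List Int)) (out : List (List String) × List (List Int)) : Prop := out = calculate_new_offsets_alt ontonotes_sentence coreference_offsets
instance (ontonotes_sentence : List (List String)) (coreference_offsets : List (List Int)) (out : List (List String) × List (List Int)) : Decidable (Spec_calculate_new_offsets ontonotes_sentence coreference_offsets out) := by unfold Spec_calculate_new_offsets; infer_instance

-- ===== CLAIM (what is proved, stated in full; the proofs are below) =====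
def Claim_equal_calculate_new_offsets : Prop := ∀ (ontonotes_sentence : List (List String)) (coreference_offsets : List (List Int)), Dom_calculate_new_offsets ontonotes_sentence coreference_offsets → Pre_calculate_new_offsets ontonotes_sentence coreference_offsets → Spec_calculate_new_offsets ontonotes_sentence coreference_offsets (calculate_new_offsets ontonotes_sentence coreference_offsets)

-- ===== LEMMAS AND PROOFS =====

-- A's scan, restated with the running sentence start carried along instead of the
-- recomputed prefix sum.
def pvScanS (l : List (List String)) (b : Int) (o0 : Int) : Option (List String × Int) :=
  match l with
  | [] => none
  | s :: rest =>
    if b ≤ o0 ∧ o0 ≤ b + (s.length : Int) - 1 then some (s, b)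
    else pvScanS rest (b + (s.length : Int)) o0

lemma pvScanS_none_of_lt (l : List (List String)) (b o0 : Int) (h : o0 < b) :
    pvScanS l b o0 = none := by
  induction l generalizing b with
  | nil => rfl
  | cons s rest ih =>
    simp only [pvScanS]
    rw [if_neg (by omega)]
    exact ih _ (by omega)

lemma pvScanA_eq_pvScanS (rest pre : List (List String)) (o0 : Int) :
    pvScanA (pre ++ rest) rest pre.length o0 = pvScanS rest ((pvSumLen pre : Nat) : Int) o0 := by
  induction rest generalizing pre with
  | nil => rfl
  | cons s rest' ih =>
    simp only [pvScanA, pvScanS]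
    have htake : (pre ++ s :: rest').take pre.length = pre := by
      simp [List.take_left' (l₂ := s :: rest') rfl]
    rw [htake]
    by_cases h : ((pvSumLen pre : Nat) : Int) ≤ o0 ∧ o0 ≤ ((pvSumLen pre : Nat) : Int) + (s.length : Int) - 1
    · rw [if_pos h, if_pos h]
    · rw [if_neg h, if_neg h]
      have := ih (pre ++ [s])
      simp only [List.append_assoc, List.singleton_append, List.length_append,
        List.length_singleton] at this
      rw [this]
      have : pvSumLen (pre ++ [s]) = pvSumLen pre + s.length := by
        simp [pvSumLen]
      rw [this]
      push_cast
      ring_nf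

lemma pvRangeInsert_get? (n : Nat) (b : Int) (v : List String × Int)
    (d : PySem.Dict Int (List String × Int)) (o0 : Int) :
    ((List.range n).foldl (fun d j => d.insert (b + (j : Int)) v) d).get? o0
      = if b ≤ o0 ∧ o0 < b + (n : Int) then some v else d.get? o0 := by
  induction n generalizing d with
  | zero => rw [if_neg (by omega)]; rfl
  | succ m ih =>
    rw [List.range_succ, List.foldl_append]
    simp only [List.foldl_cons, List.foldl_nil]
    rw [PySem.Dict.get?_insert, ih]
    by_cases h1 : o0 = b + (m : Int)
    · rw [if_pos h1, if_pos (by omega)]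
    · rw [if_neg h1]
      by_cases h2 : b ≤ o0 ∧ o0 < b + (m : Int)
      · rw [if_pos h2, if_pos (by omega)]
      · rw [if_neg h2, if_neg (by omega)]

lemma pvBuildIdx_get? (l : List (List String)) (b : Int)
    (d : PySem.Dict Int (List String × Int)) (o0 : Int) :
    (pvBuildIdx l b d).get? o0 = (pvScanS l b o0).or (d.get? o0) := by
  induction l generalizing b d with
  | nil => rfl
  | cons s rest ih =>
    simp only [pvBuildIdx, pvScanS]
    rw [ih, pvRangeInsert_get?]
    by_cases h : b ≤ o0 ∧ o0 ≤ b + (s.length : Int) - 1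
    · rw [if_pos h, if_pos (by omega), pvScanS_none_of_lt rest _ o0 (by omega)]
      rfl
    · rw [if_neg h, if_neg (by omega)]

-- the index lookup computes exactly A's scan
lemma pvLookup_eq (ont : List (List String)) (o0 : Int) :
    (pvBuildIdx ont 0 PySem.Dict.empty).get? o0 = pvScanA ont ont 0 o0 := by
  rw [pvBuildIdx_get?, PySem.Dict.get?_empty, Option.or_none]
  have := pvScanA_eq_pvScanS ont [] o0
  simp only [List.nil_append, List.length_nil] at this
  rw [this]
  rfl

-- the abstraction map from an A-state to a B-state: seen is the set of the unique list,
-- total is cumulative + previous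
def pvPhi (st : List (List String) × List (List Int) × Int × Int) :
    List (List String) × PySem.Set (List String) × Int × List (List Int) :=
  (st.1, PySem.Set.ofList st.1, st.2.2.1 + st.2.2.2, st.2.1)

-- B's fold over the hit list simulates A's fold over the offsets, for any A-state
-- whose 'previous_length' field is the length of the last unique sentence
lemma pvFold_sim (ont : List (List String)) (d : PySem.Dict Int (List String × Int))
    (hd : ∀ o0, d.get? o0 = pvScanA ont ont 0 o0)
    (offs : List (List Int)) :
    ∀ st : List (List String) × List (List Int) × Int × Int,
      st.2.2.2 = (((st.1.getLast?).getD []).length : Int) →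
      (pvHits d offs).foldl pvStepB (pvPhi st) = pvPhi (offs.foldl (pvStepA ont) st) := by
  simp only [pvHits, hd]
  induction offs with
  | nil => intro st _; rfl
  | cons o offs' ih =>
    intro st hprev
    obtain ⟨us, out, cum, prev⟩ := st
    replace hprev : prev = (((us.getLast?).getD []).length : Int) := hprev
    rw [List.filterMap_cons, List.foldl_cons]
    cases hscan : pvScanA ont ont 0 (o.getD 0 0) with
    | none =>
      have hA : pvStepA ont (us, out, cum, prev) o = (us, out, cum, prev) := by
        unfold pvStepA; rw [hscan]
      rw [hA]
      exact ih (us, out, cum, prev) hprev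
    | some p =>
      obtain ⟨s, start⟩ := p
      simp only [Option.map_some, List.foldl_cons]
      have hA : pvStepA ont (us, out, cum, prev) o
          = (if s ∈ us then us else us ++ [s],
             out ++ [[o.getD 0 0 - start + (if s ∈ us then cum else cum + prev),
                      (o.getD 0 0 - start + (if s ∈ us then cum else cum + prev))
                        + (o.getD 1 0 - o.getD 0 0)]],
             (if s ∈ us then cum else cum + prev),
             ((((if s ∈ us then us else us ++ [s]).getLast?).getD []).length : Int)) := by
        unfold pvStepA; rw [hscan]
      have hstep : pvStepB (pvPhi (us, out, cum, prev)) ((s, start), o.getD 0 0, o.getD 1 0)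
          = pvPhi (pvStepA ont (us, out, cum, prev) o) := by
        rw [hA]
        subst hprev
        by_cases h : s ∈ us
        · have hc : (PySem.Set.ofList us).contains s = true := by
            rw [PySem.Set.contains_iff, PySem.Set.mem_ofList]; exact h
          simp only [pvStepB, pvPhi, hc, Bool.not_true, Bool.false_eq_true, if_false, if_pos h,
            Prod.mk.injEq]
          refine ⟨trivial, trivial, trivial, ?_⟩
          congr 1
          simp only [List.cons.injEq, and_true]
          exact ⟨by ring, by ring⟩
        · have hc : (PySem.Set.ofList us).contains s = false := by
            rw [Bool.eq_false_iff, Ne, PySem.Set.contains_iff, PySem.Set.mem_ofList]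
            exact h
          have hlast : (((us ++ [s]).getLast?).getD []) = s := by
            rw [List.getLast?_concat]; rfl
          simp only [pvStepB, pvPhi, hc, Bool.not_false, if_true, if_neg h,
            PySem.Set.ofList_append_singleton, hlast, Prod.mk.injEq]
          refine ⟨trivial, trivial, trivial, ?_⟩
          congr 1
          simp only [List.cons.injEq, and_true]
          exact ⟨by ring, by ring⟩
      rw [hstep]
      exact ih (pvStepA ont (us, out, cum, prev) o) (by rw [hA])

-- ===== VERDICT (by name: the statement is the Claim_ definition above) =====
theorem calculate_new_offsets_spec : Claim_equal_calculate_new_offsets := by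
  intro ont offs _ _
  unfold Spec_calculate_new_offsets
  have hphi : (([], PySem.Set.empty, 0, []) :
      List (List String) × PySem.Set (List String) × Int × List (List Int))
      = pvPhi ([], [], 0, 0) := by
    simp [pvPhi, PySem.Set.ofList_nil]
  have h := pvFold_sim ont (pvBuildIdx ont 0 PySem.Dict.empty) (pvLookup_eq ont) offs
    ([], [], 0, 0) (by simp)
  have ha : calculate_new_offsets ont offs
      = ((offs.foldl (pvStepA ont) ([], [], 0, 0)).1,
         (offs.foldl (pvStepA ont) ([], [], 0, 0)).2.1) := rfl
  have hb : calculate_new_offsets_alt ont offs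
      = (((pvHits (pvBuildIdx ont 0 PySem.Dict.empty) offs).foldl pvStepB
            ([], PySem.Set.empty, 0, [])).1,
         ((pvHits (pvBuildIdx ont 0 PySem.Dict.empty) offs).foldl pvStepB
            ([], PySem.Set.empty, 0, [])).2.2.2) := rfl
  show calculate_new_offsets ont offs = calculate_new_offsets_alt ont offs
  rw [ha, hb, hphi, h]
  rfl
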